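-- pv_equiv track=rewrite | github.com/tupe0x1/AlgoHW10_ex1 | airport.py | create_shapley_map
-- ===== SOURCE A (Python) =====
-- import itertools
--
-- def _powerset(iterable):
--     s = list(iterable)
--     return itertools.chain.from_iterable(itertools.combinations(s, r) for r in range(len(s) + 1))
--
-- def create_shapley_map(players_costs: dict):
--     all_players = players_costs.keys()
--     map_subset_to_cost = {
--         "".join(sorted(subset)): max([players_costs[player] for player in subset])
--         for subset in _powerset(all_players)
--         if len(subset) > 0
--     }
--     map_subset_to_cost[""] = 0
--     return ''.join(all_players), map_subset_to_cost
-- ===== SOURCE B (Python) =====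
-- def create_shapley_map(players_costs: dict):
--     items = list(players_costs.items())
--     mapping = {}
--
--     def choose(avail, need, prefix, pm):
--         if need == 0:
--             mapping["".join(sorted(prefix))] = pm
--             return
--         for i in range(len(avail)):
--             name, cost = avail[i]
--             choose(avail[i + 1:], need - 1, prefix + [name],
--                    cost if not prefix else max(pm, cost))
--
--     for r in range(1, len(items) + 1):
--         choose(items, r, [], 0)
--     mapping[""] = 0
--     return "".join(name for name, _ in items), mapping
-- ===== Notes on version B (the rewrite author's own statement) =====
-- stated objective: alternative
-- what changed: Replaces A's itertools powerset enumeration with a per-subset list-comprehension lookup and max() scan by a recursive backtracking enumeration over the items that threads the running maximum along shared combination prefixes, inserting each key as it is completed.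
import Mathlib
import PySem

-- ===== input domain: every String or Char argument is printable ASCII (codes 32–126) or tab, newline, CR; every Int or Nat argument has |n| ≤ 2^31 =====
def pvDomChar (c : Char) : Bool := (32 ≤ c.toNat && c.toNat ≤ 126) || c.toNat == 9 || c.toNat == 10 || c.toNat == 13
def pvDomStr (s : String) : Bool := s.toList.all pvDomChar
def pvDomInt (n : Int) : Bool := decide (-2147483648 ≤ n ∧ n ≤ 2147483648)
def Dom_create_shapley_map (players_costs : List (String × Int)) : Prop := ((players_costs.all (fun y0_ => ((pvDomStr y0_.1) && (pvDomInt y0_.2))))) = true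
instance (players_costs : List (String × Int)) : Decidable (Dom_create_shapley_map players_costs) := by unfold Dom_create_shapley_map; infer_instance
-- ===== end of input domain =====

-- B replaces A's itertools powerset + per-subset list-comprehension/max scan by a recursive
-- backtracking enumeration that threads the running maximum along shared prefixes (alternative
-- decomposition, same exponential output size).

-- shared helper: Python's "".join(sorted(xs)) on strings; Python string comparison is
-- code-point lexicographic, which is exactly the lexicographic order on the char lists.
def pyJoinSorted (xs : List String) : String :=
  PySem.Str.join "" (PySem.List.sorted xs (fun s => s.toList) false)

-- ===== PORT A =====
-- _powerset: chain(combinations(s, r) for r in range(len(s)+1))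
def pyPowerset (s : List String) : List (List String) :=
  (List.range (s.length + 1)).flatMap (fun r => PySem.List.combinations s r)

def create_shapley_map (players_costs : List (String × Int)) : String × (List (String × Int)) :=
  let d := PySem.Dict.ofList players_costs
  let all_players := d.keys
  -- the dict comprehension with its `if len(subset) > 0` filter;
  -- max([...]) runs on a nonempty list under the guard, so the `.getD 0` default is never used,
  -- and players_costs[player] with player ∈ keys never raises, so getD's default is never used.
  let m := (pyPowerset all_players).foldl
    (fun acc subset =>
      if subset.length > 0 then
        acc.insert (pyJoinSorted subset)
          ((PySem.List.max? (subset.map (fun p => d.getD p 0)) (fun x => x)).getD 0)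
      else acc)
    PySem.Dict.empty
  (PySem.Str.join "" all_players, (m.insert "" 0).items)

-- ===== PORT B =====
-- choose(avail, need, prefix, pm): pick `need` more players from `avail` (in order); at a full
-- combination record the key with the threaded running max `pm` (pm is a dead placeholder while
-- prefix is empty, exactly as in Source B).
def chooseLoop (mapping : PySem.Dict String Int) (avail : List (String × Int)) (need : Nat)
    (pref : List String) (pm : Int) : PySem.Dict String Int :=
  match need, avail with
  | 0, _ => mapping.insert (pyJoinSorted pref) pm
  | _ + 1, [] => mapping
  | need' + 1, (name, cost) :: rest =>
      chooseLoop
        (chooseLoop mapping rest need' (pref ++ [name])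
          (if pref.isEmpty then cost else max pm cost))
        rest (need' + 1) pref pm
termination_by avail.length
decreasing_by all_goals simp

def create_shapley_map_alt (players_costs : List (String × Int)) : String × (List (String × Int)) :=
  let items := (PySem.Dict.ofList players_costs).items
  -- for r in range(1, len(items) + 1): choose(items, r, [], 0)
  let m := (List.range items.length).foldl
    (fun acc r => chooseLoop acc items (r + 1) [] 0) PySem.Dict.empty
  (PySem.Str.join "" (items.map Prod.fst), (m.insert "" 0).items)

-- ===== PRECONDITION & SPEC =====
def Spec_create_shapley_map (players_costs : List (String × Int)) (out : String × (List (String × Int))) : Prop := out = create_shapley_map_alt players_costs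
instance (players_costs : List (String × Int)) (out : String × (List (String × Int))) : Decidable (Spec_create_shapley_map players_costs out) := by unfold Spec_create_shapley_map; infer_instance

-- ===== CLAIM (what is proved, stated in full; the proofs are below) =====
def Claim_equal_create_shapley_map : Prop := ∀ (players_costs : List (String × Int)), Dom_create_shapley_map players_costs → Spec_create_shapley_map players_costs (create_shapley_map players_costs)

-- ===== LEMMAS AND PROOFS =====

-- the value chooseLoop threads: gval e pm vs = pm after folding vs in, where e says "prefix still empty"
def gval : Bool → Int → List Int → Int
  | _, pm, [] => pm
  | e, pm, v :: vs => gval false (if e then v else max pm v) vs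

theorem gval_false (pm : Int) (vs : List Int) : gval false pm vs = vs.foldl max pm := by
  induction vs generalizing pm with
  | nil => rfl
  | cons v vs ih => simp [gval, ih, List.foldl_cons]

-- chooseLoop is the fold of one insert per combination, in combinations order
theorem chooseLoop_eq (avail : List (String × Int)) (need : Nat) (pref : List String)
    (pm : Int) (m : PySem.Dict String Int) :
    chooseLoop m avail need pref pm =
      (PySem.List.combinations avail need).foldl
        (fun acc c => acc.insert (pyJoinSorted (pref ++ c.map Prod.fst))
          (gval pref.isEmpty pm (c.map Prod.snd))) m := by
  induction avail generalizing need pref pm m with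
  | nil =>
    cases need with
    | zero => simp [chooseLoop, PySem.List.combinations_zero, gval]
    | succ n => simp [chooseLoop, PySem.List.combinations_nil_succ]
  | cons hd rest ih =>
    cases need with
    | zero => simp [chooseLoop, PySem.List.combinations_zero, gval]
    | succ n =>
      obtain ⟨name, cost⟩ := hd
      rw [chooseLoop, PySem.List.combinations_cons_succ, List.foldl_append, List.foldl_map,
        ih, ih]
      congr 1
      apply PySem.List.foldl_congr_mem
      intro acc c _
      have hne : (pref ++ [name]).isEmpty = false := by simp
      simp [gval, List.append_assoc, hne]

-- one size class r+1: A's fold over combinations of the keys = B's backtracking call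
theorem perR (d : PySem.Dict String Int) (hn : d.keys.Nodup) (r : Nat)
    (acc : PySem.Dict String Int) :
    (PySem.List.combinations d.keys (r + 1)).foldl
      (fun acc subset =>
        if subset.length > 0 then
          acc.insert (pyJoinSorted subset)
            ((PySem.List.max? (subset.map (fun p => d.getD p 0)) (fun x => x)).getD 0)
        else acc) acc
      = chooseLoop acc d.items (r + 1) [] 0 := by
  rw [chooseLoop_eq]
  have hkeys : d.keys = d.items.map Prod.fst := rfl
  rw [hkeys, PySem.List.combinations_map, List.foldl_map]
  apply PySem.List.foldl_congr_mem
  intro a c hc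
  have hlen : c.length = r + 1 := PySem.List.length_of_mem_combinations hc
  have hsub : c.Sublist d.items := PySem.List.sublist_of_mem_combinations hc
  have hvals : (c.map Prod.fst).map (fun p => d.getD p 0) = c.map Prod.snd := by
    rw [List.map_map]
    apply List.map_congr_left
    intro kv hkv
    obtain ⟨k, v⟩ := kv
    exact PySem.Dict.getD_of_mem_items d (hsub.mem hkv) hn 0
  cases c with
  | nil => simp at hlen
  | cons kv cs =>
    simp only [List.map_map, List.map_cons, List.cons.injEq] at hvals
    obtain ⟨h1, h2⟩ := hvals
    simp [gval, gval_false, PySem.List.max?_id_cons, h1, h2]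

theorem create_shapley_map_spec' (players_costs : List (String × Int)) :
    create_shapley_map players_costs = create_shapley_map_alt players_costs := by
  unfold create_shapley_map create_shapley_map_alt pyPowerset
  dsimp only
  have hkeys : (PySem.Dict.ofList players_costs).keys
      = (PySem.Dict.ofList players_costs).items.map Prod.fst := rfl
  have hn : (PySem.Dict.ofList players_costs).keys.Nodup :=
    PySem.Dict.nodup_keys_ofList players_costs
  have hlen : (PySem.Dict.ofList players_costs).keys.length
      = (PySem.Dict.ofList players_costs).items.length := by
    rw [hkeys, List.length_map]
  rw [List.foldl_flatMap, hlen, List.range_succ_eq_map, List.foldl_cons, List.foldl_map]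
  have h0 : ∀ a : PySem.Dict String Int,
      (PySem.List.combinations (PySem.Dict.ofList players_costs).keys 0).foldl
        (fun acc subset =>
          if subset.length > 0 then
            acc.insert (pyJoinSorted subset)
              ((PySem.List.max? (subset.map (fun p => (PySem.Dict.ofList players_costs).getD p 0))
                  (fun x => x)).getD 0)
          else acc) a = a := by
    intro a
    simp [PySem.List.combinations_zero]
  rw [h0, ← hkeys]
  refine congrArg _ (congrArg _ (congrArg (fun m => PySem.Dict.insert m "" 0) ?_))
  apply PySem.List.foldl_congr_mem
  intro a r _
  exact perR _ hn r a

-- ===== VERDICT (by name: the statement is the Claim_ definition above) =====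
theorem create_shapley_map_spec : Claim_equal_create_shapley_map := by
  intro players_costs _
  exact create_shapley_map_spec' players_costs
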